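-- pv_equiv track=rewrite | github.com/zuzuka28/exersises_g-ib | fishing_sites/fishing_sites.py | generate_fish
-- ===== SOURCE A (Python) =====
-- def last_symbol_change(domen):
--     """97(a) - 122(z)
--     48(0) - 57(9)
--     128(А) - 159(Я)"""
--
--     fish = []
--
--     # letters
--     for _ in range(97, 123):
--         fish.append(domen + chr(_))
--
--     # numbers
--     for _ in range(48, 58):
--         fish.append(domen + chr(_))
--
--     return fish
--
-- def add_subdomen(domen):
--     fish = []
--
--     for i in range(1, len(domen)):
--         if domen[:i][-1] != '-' and domen[i:][0] != '-':
--             tmp = domen[:i] + '.' + domen[i:]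
--             fish.append(tmp)
--
--     return fish
--
-- def del_symbol(domen):
--     domen = list(domen)
--     fish = []
--
--     for i in range(len(domen)):
--         tmp = domen.pop(i)
--         fish.append(''.join(domen))
--         domen.insert(i, tmp)
--
--     return fish
--
-- def homoglyph_change(domen, fish=None, letter_index=0):
--     if fish is None:
--         fish = []
--
--     homoglyph = {'i': '1', 'l': '1', 'o': '0', 'a': '4', 'g': '9', 's': '5', 't': '7', 'z': '2'}
--
--     if letter_index == len(domen):
--         fish.append(domen)
--         return
--
--     letter_to_replace = domen[letter_index]
--
--     if letter_to_replace in homoglyph.keys():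
--         replaced = domen[:letter_index] + homoglyph[letter_to_replace] + domen[letter_index + 1:]
--         homoglyph_change(replaced, fish, letter_index + 1)
--
--         homoglyph_change(domen, fish, letter_index + 1)
--     else:
--         homoglyph_change(domen, fish, letter_index + 1)
--
--     return fish
--
-- def generate_fish(domen):
--     fish = []
--
--     domen_zone = ['.com', '.ru', '.net', '.org', '.info', '.cn', '.es', '.top', '.au', '.pl', '.it',
--                   '.uk', '.tk', '.ml', '.ga', '.cf', '.us', '.xyz', '.top', '.site', '.win', '.bid']
--
--     wordlist = last_symbol_change(domen) + add_subdomen(domen) + del_symbol(domen) + homoglyph_change(domen)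
--
--     for i in wordlist:
--         for j in domen_zone:
--             fish.append(i + j)
--     return fish
-- ===== SOURCE B (Python) =====
-- # B: comprehension/product-based rebuild: homoglyph variants via per-character option
-- # lists + itertools.product instead of recursion; slices instead of pop/insert; flat
-- # comprehensions instead of accumulator loops. Same outputs in the same order.
-- import itertools
--
-- _HOMOGLYPH = {'i': '1', 'l': '1', 'o': '0', 'a': '4', 'g': '9', 's': '5', 't': '7', 'z': '2'}
-- _ZONES = ['.com', '.ru', '.net', '.org', '.info', '.cn', '.es', '.top', '.au', '.pl', '.it',
--           '.uk', '.tk', '.ml', '.ga', '.cf', '.us', '.xyz', '.top', '.site', '.win', '.bid']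
-- _TAIL = 'abcdefghijklmnopqrstuvwxyz0123456789'
--
-- def generate_fish(domen):
--     wordlist = [domen + c for c in _TAIL]
--     wordlist += [domen[:i] + '.' + domen[i:] for i in range(1, len(domen))
--                  if domen[i - 1] != '-' and domen[i] != '-']
--     wordlist += [domen[:i] + domen[i + 1:] for i in range(len(domen))]
--     options = [[_HOMOGLYPH[c], c] if c in _HOMOGLYPH else [c] for c in domen]
--     wordlist += [''.join(combo) for combo in itertools.product(*options)]
--     return [w + z for w in wordlist for z in _ZONES]
-- ===== Notes on version B (the rewrite author's own statement) =====
-- stated objective: simpler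
-- what changed: The accumulator loops become flat comprehensions, del_symbol's pop/join/insert becomes slicing, and the recursive homoglyph DFS becomes an itertools.product over per-character option lists.
import Mathlib
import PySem

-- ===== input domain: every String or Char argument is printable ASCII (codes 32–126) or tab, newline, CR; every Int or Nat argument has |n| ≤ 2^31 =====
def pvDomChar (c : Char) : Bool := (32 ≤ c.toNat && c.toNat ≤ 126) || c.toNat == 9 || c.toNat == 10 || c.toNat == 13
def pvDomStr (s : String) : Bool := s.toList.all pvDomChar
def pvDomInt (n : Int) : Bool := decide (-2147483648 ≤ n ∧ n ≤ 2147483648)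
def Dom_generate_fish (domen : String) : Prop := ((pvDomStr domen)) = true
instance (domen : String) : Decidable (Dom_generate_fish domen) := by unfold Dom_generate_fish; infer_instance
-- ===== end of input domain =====

-- B rebuilds the word list with comprehensions and an itertools.product over per-character
-- homoglyph option lists instead of A's accumulator loops and recursive DFS (objective: simpler).

-- ===== PORT A =====
-- strings are handled as List Char (PySem.Chars style); chr(n) = Char.ofNat n.toNat, exact on 0..126

def lastSymbolChangeA (l : List Char) : List (List Char) :=
  -- letters loop, then numbers loop, each appending domen + chr(_)
  let fish := (PySem.List.pyRange 97 123 1).foldl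
    (fun acc n => acc ++ [l ++ [Char.ofNat n.toNat]]) []
  (PySem.List.pyRange 48 58 1).foldl
    (fun acc n => acc ++ [l ++ [Char.ofNat n.toNat]]) fish

def addSubdomenA (l : List Char) : List (List Char) :=
  (PySem.List.pyRange 1 (l.length : Int) 1).foldl
    (fun acc i =>
      -- domen[:i][-1] and domen[i:][0]; both indexings are in range for 1 ≤ i < len
      if (PySem.List.pyGet? (l.take i.toNat) (-1) != some '-')
          && (PySem.List.pyGet? (l.drop i.toNat) 0 != some '-') then
        acc ++ [l.take i.toNat ++ '.' :: l.drop i.toNat]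
      else acc) []

def delSymbolA (l : List Char) : List (List Char) :=
  -- tmp = domen.pop(i); append(join(domen)); domen.insert(i, tmp) restores the list,
  -- so the carried state is the fish accumulator only
  (PySem.List.pyRange 0 (l.length : Int) 1).foldl
    (fun acc i =>
      match PySem.List.pop? l i with
      | some (_, rest) => acc ++ [rest]
      | none => acc) []   -- unreachable: i is always in range

def hgLookupA (c : Char) : Option Char :=
  -- homoglyph dict lookup
  (([('i','1'),('l','1'),('o','0'),('a','4'),('g','9'),('s','5'),('t','7'),('z','2')] :
    List (Char × Char)).lookup c)

-- recursion on the unprocessed suffix `rest` (domen[:letter_index] is `pre`): the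
-- replaced-branch recursion runs first, then the unchanged-branch recursion on its fish
def hgA (pre : List Char) (rest : List Char) (fish : List (List Char)) : List (List Char) :=
  match rest with
  | [] => fish ++ [pre]
  | c :: t =>
    match hgLookupA c with
    | some r => hgA (pre ++ [c]) t (hgA (pre ++ [r]) t fish)
    | none => hgA (pre ++ [c]) t fish

def homoglyphChangeA (l : List Char) : List (List Char) := hgA [] l []

def domenZoneA : List (List Char) :=
  [".com".toList, ".ru".toList, ".net".toList, ".org".toList, ".info".toList, ".cn".toList,
   ".es".toList, ".top".toList, ".au".toList, ".pl".toList, ".it".toList, ".uk".toList,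
   ".tk".toList, ".ml".toList, ".ga".toList, ".cf".toList, ".us".toList, ".xyz".toList,
   ".top".toList, ".site".toList, ".win".toList, ".bid".toList]

def generate_fish (domen : String) : List String :=
  let l := domen.toList
  let wordlist := lastSymbolChangeA l ++ addSubdomenA l ++ delSymbolA l ++ homoglyphChangeA l
  (wordlist.foldl (fun acc w => domenZoneA.foldl (fun acc2 z => acc2 ++ [w ++ z]) acc) []).map
    String.mk

-- ===== PORT B =====

def tailCharsB : List Char := "abcdefghijklmnopqrstuvwxyz0123456789".toList

def zonesB : List (List Char) :=
  [".com".toList, ".ru".toList, ".net".toList, ".org".toList, ".info".toList, ".cn".toList,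
   ".es".toList, ".top".toList, ".au".toList, ".pl".toList, ".it".toList, ".uk".toList,
   ".tk".toList, ".ml".toList, ".ga".toList, ".cf".toList, ".us".toList, ".xyz".toList,
   ".top".toList, ".site".toList, ".win".toList, ".bid".toList]

def hgOptionsB (c : Char) : List Char :=
  match (([('i','1'),('l','1'),('o','0'),('a','4'),('g','9'),('s','5'),('t','7'),('z','2')] :
    List (Char × Char)).lookup c) with
  | some r => [r, c]
  | none => [c]

-- itertools.product: leftmost option list varies slowest
def productB : List (List Char) → List (List Char)
  | [] => [[]]
  | opts :: rest => opts.flatMap (fun o => (productB rest).map (o :: ·))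

def generate_fish_alt (domen : String) : List String :=
  let l := domen.toList
  let wordlist :=
    tailCharsB.map (fun c => l ++ [c])
    ++ (((PySem.List.pyRange 1 (l.length : Int) 1).filter
          (fun i => (PySem.List.pyGet? l (i - 1) != some '-')
                    && (PySem.List.pyGet? l i != some '-'))).map
          (fun i => l.take i.toNat ++ '.' :: l.drop i.toNat))
    ++ ((PySem.List.pyRange 0 (l.length : Int) 1).map
          (fun i => l.take i.toNat ++ l.drop (i.toNat + 1)))
    ++ productB (l.map hgOptionsB)
  (wordlist.flatMap (fun w => zonesB.map (fun z => w ++ z))).map String.mk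

-- ===== PRECONDITION & SPEC =====
-- Pre_ excludes only the empty string, on which A raises TypeError (homoglyph_change's
-- top-level call hits the early bare `return` and yields None, which generate_fish
-- then tries to concatenate to a list).
def Pre_generate_fish (domen : String) : Prop := domen ≠ ""
instance (domen : String) : Decidable (Pre_generate_fish domen) := by
  unfold Pre_generate_fish; infer_instance
def pvWitness_generate_fish : String := "go-ogle"

def Spec_generate_fish (domen : String) (out : List String) : Prop := out = generate_fish_alt domen
instance (domen : String) (out : List String) : Decidable (Spec_generate_fish domen out) := by
  unfold Spec_generate_fish; infer_instance

-- ===== CLAIM (what is proved, stated in full; the proofs are below) =====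
def Claim_equal_generate_fish : Prop := ∀ (domen : String), Dom_generate_fish domen →
  Pre_generate_fish domen → Spec_generate_fish domen (generate_fish domen)

-- ===== LEMMAS AND PROOFS =====

theorem last_eq (l : List Char) : lastSymbolChangeA l = tailCharsB.map (fun c => l ++ [c]) := by
  have ht : tailCharsB
      = ((PySem.List.pyRange 97 123 1).map (fun n => Char.ofNat n.toNat))
        ++ ((PySem.List.pyRange 48 58 1).map (fun n => Char.ofNat n.toNat)) := by decide
  unfold lastSymbolChangeA
  rw [PySem.List.foldl_append_singleton_eq_map, PySem.List.foldl_append_singleton_eq_map,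
    List.nil_append, ht, List.map_append, List.map_map, List.map_map]
  rfl

theorem pyGet_take_last (l : List Char) (i : Int) (h1 : 1 ≤ i) (h2 : i < (l.length : Int)) :
    PySem.List.pyGet? (l.take i.toNat) (-1) = PySem.List.pyGet? l (i - 1) := by
  have hk : i.toNat ≤ l.length := by omega
  have hlen : (l.take i.toNat).length = i.toNat := by simp; omega
  have h1' : i - 1 = ((i.toNat - 1 : Nat) : Int) := by omega
  rw [h1', PySem.List.pyGet?_natCast]
  simp only [PySem.List.pyGet?, PySem.List.pyIdx?, hlen]
  rw [if_neg (by norm_num), if_pos (show -((i.toNat : Int)) ≤ -1 by omega)]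
  simp only [Option.bind_some]
  rw [List.getElem?_take]
  rw [if_pos (by omega)]
  norm_num

theorem pyGet_drop_head (l : List Char) (i : Int) (h1 : 0 ≤ i) (_h2 : i < (l.length : Int)) :
    PySem.List.pyGet? (l.drop i.toNat) 0 = PySem.List.pyGet? l i := by
  have hi : i = ((i.toNat : Nat) : Int) := by omega
  rw [hi, PySem.List.pyGet?_natCast]
  have h0 : (0 : Int) = ((0 : Nat) : Int) := rfl
  rw [h0, PySem.List.pyGet?_natCast]
  rw [List.getElem?_drop]
  have hmax : (max i 0).toNat = i.toNat := by omega
  norm_num [hmax]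

theorem add_eq (l : List Char) :
    addSubdomenA l
      = ((PySem.List.pyRange 1 (l.length : Int) 1).filter
          (fun i => (PySem.List.pyGet? l (i - 1) != some '-')
                    && (PySem.List.pyGet? l i != some '-'))).map
          (fun i => l.take i.toNat ++ '.' :: l.drop i.toNat) := by
  unfold addSubdomenA
  rw [PySem.List.foldl_congr_mem _ _
    (fun acc i => if ((PySem.List.pyGet? l (i - 1) != some '-')
                    && (PySem.List.pyGet? l i != some '-')) = true then
        acc ++ [l.take i.toNat ++ '.' :: l.drop i.toNat] else acc) _ ?_]
  · rw [PySem.List.foldl_append_if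
      (fun i => (PySem.List.pyGet? l (i - 1) != some '-')
                    && (PySem.List.pyGet? l i != some '-'))
      (fun i => l.take i.toNat ++ '.' :: l.drop i.toNat)]
    simp
  · intro acc i hi
    obtain ⟨ha, hb⟩ := PySem.List.mem_pyRange_one.1 hi
    rw [pyGet_take_last l i ha hb, pyGet_drop_head l i (by omega) hb]

theorem del_eq (l : List Char) :
    delSymbolA l
      = (PySem.List.pyRange 0 (l.length : Int) 1).map
          (fun i => l.take i.toNat ++ l.drop (i.toNat + 1)) := by
  unfold delSymbolA
  rw [PySem.List.foldl_congr_mem _ _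
    (fun acc i => acc ++ [l.take i.toNat ++ l.drop (i.toNat + 1)]) _ ?_]
  · rw [PySem.List.foldl_append_singleton_eq_map]; simp
  · intro acc i hi
    obtain ⟨ha, hb⟩ := PySem.List.mem_pyRange_one.1 hi
    have hk : i.toNat < l.length := by omega
    have hi' : i = ((i.toNat : Nat) : Int) := by omega
    have hp : PySem.List.pop? l i = some (l[i.toNat]'hk, l.eraseIdx i.toNat) := by
      conv_lhs => rw [hi']
      exact PySem.List.pop?_natCast l i.toNat hk
    rw [hp]
    simp [List.eraseIdx_eq_take_drop_succ]

theorem map_pre_cons (pre : List Char) (o : Char) (P : List (List Char)) :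
    (P.map (fun w => o :: w)).map (fun w => pre ++ w) = P.map (fun w => (pre ++ [o]) ++ w) := by
  rw [List.map_map]
  apply List.map_congr_left
  intro w _
  simp

theorem hgA_eq (rest : List Char) : ∀ (pre : List Char) (fish : List (List Char)),
    hgA pre rest fish = fish ++ (productB (rest.map hgOptionsB)).map (fun w => pre ++ w) := by
  induction rest with
  | nil => intro pre fish; simp [hgA, productB]
  | cons c t ih =>
    intro pre fish
    cases h : hgLookupA c with
    | none =>
      have ho : hgOptionsB c = [c] := by unfold hgLookupA at h; simp [hgOptionsB, h]
      simp only [hgA, h, ih, List.map_cons, ho, productB, List.flatMap_cons,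
        List.flatMap_nil, List.append_nil]
      rw [map_pre_cons]
    | some r =>
      have ho : hgOptionsB c = [r, c] := by unfold hgLookupA at h; simp [hgOptionsB, h]
      simp only [hgA, h, ih, List.map_cons, ho, productB, List.flatMap_cons,
        List.flatMap_nil, List.append_nil, List.map_append]
      rw [map_pre_cons, map_pre_cons, List.append_assoc]

theorem outer_eq (ws : List (List Char)) :
    ws.foldl (fun acc w => domenZoneA.foldl (fun acc2 z => acc2 ++ [w ++ z]) acc) []
      = ws.flatMap (fun w => zonesB.map (fun z => w ++ z)) := by
  rw [show domenZoneA = zonesB from rfl]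
  rw [PySem.List.foldl_congr_mem ws _ (fun acc w => acc ++ zonesB.map (fun z => w ++ z)) []
      (fun acc w _ => PySem.List.foldl_append_singleton_eq_map (fun z => w ++ z) zonesB acc),
    PySem.List.foldl_append_eq_flatMap]
  simp

-- ===== VERDICT =====

theorem generate_fish_spec : Claim_equal_generate_fish := by
  intro domen _ _
  show generate_fish domen = generate_fish_alt domen
  simp only [generate_fish, generate_fish_alt]
  rw [last_eq, add_eq, del_eq, outer_eq]
  have hg : homoglyphChangeA domen.toList = productB (domen.toList.map hgOptionsB) := by
    simp [homoglyphChangeA, hgA_eq]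
  rw [hg]
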